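-- pv_equiv track=rewrite | github.com/tadinhkien99/pdf_extraction_llm | utils/utils.py | find_three_spoken_digits
-- ===== SOURCE A (Python) =====
-- WORD_TO_DIGIT = {
--     "zero": "0",
--     "one": "1",
--     "two": "2",
--     "three": "3",
--     "four": "4",
--     "five": "5",
--     "six": "6",
--     "seven": "7",
--     "eight": "8",
--     "nine": "9"
-- }
--
-- def find_three_spoken_digits(text: str):
--     """
--     Finds exactly 3 consecutive spoken digits in the text and returns them
--     as a string (e.g., "four seven one" => "471"). Returns None if not found.
--     """
--     tokens = text.lower().split()
--     consecutive_digits = []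
--
--     for token in tokens:
--         if token in WORD_TO_DIGIT:
--             consecutive_digits.append(WORD_TO_DIGIT[token])
--         else:
--             consecutive_digits = []  # reset if we hit a non-digit token
--
--         if len(consecutive_digits) == 3:
--             return "".join(consecutive_digits)
--
--     return None
-- ===== SOURCE B (Python) =====
-- WORD_TO_DIGIT = {
--     "zero": "0",
--     "one": "1",
--     "two": "2",
--     "three": "3",
--     "four": "4",
--     "five": "5",
--     "six": "6",
--     "seven": "7",
--     "eight": "8",
--     "nine": "9"
-- }
--
-- def find_three_spoken_digits(text: str):
--     tokens = text.lower().split()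
--     for t1, t2, t3 in zip(tokens, tokens[1:], tokens[2:]):
--         if t1 in WORD_TO_DIGIT and t2 in WORD_TO_DIGIT and t3 in WORD_TO_DIGIT:
--             return "".join([WORD_TO_DIGIT[t1], WORD_TO_DIGIT[t2], WORD_TO_DIGIT[t3]])
--     return None
-- ===== Notes on version B (the rewrite author's own statement) =====
-- stated objective: alternative
-- what changed: Replaces the accumulate-and-reset state machine (a list of pending digits cleared on every non-digit token) with a stateless sliding window over zip(tokens, tokens[1:], tokens[2:]) that returns at the first position where all three tokens are digit words.
import Mathlib
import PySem

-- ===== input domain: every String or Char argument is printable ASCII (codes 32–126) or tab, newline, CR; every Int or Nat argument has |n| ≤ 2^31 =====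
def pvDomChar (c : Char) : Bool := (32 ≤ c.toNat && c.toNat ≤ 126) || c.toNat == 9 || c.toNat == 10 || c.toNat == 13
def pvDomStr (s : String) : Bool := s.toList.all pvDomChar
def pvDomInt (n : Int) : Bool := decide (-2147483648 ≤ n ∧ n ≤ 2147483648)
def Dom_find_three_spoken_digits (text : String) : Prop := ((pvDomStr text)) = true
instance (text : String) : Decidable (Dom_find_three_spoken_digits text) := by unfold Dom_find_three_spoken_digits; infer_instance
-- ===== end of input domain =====

-- B replaces A's accumulate-and-reset state machine by a stateless sliding window of
-- width 3 over zip(tokens, tokens[1:], tokens[2:]); objective: alternative decomposition.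

-- ===== PORT A =====
def WORD_TO_DIGIT : PySem.Dict String String :=
  PySem.Dict.ofList [("zero", "0"), ("one", "1"), ("two", "2"), ("three", "3"),
    ("four", "4"), ("five", "5"), ("six", "6"), ("seven", "7"), ("eight", "8"), ("nine", "9")]

-- A's loop: state = consecutive_digits; reset on a non-digit token; return at length 3.
def ftsd_loopA : List String → List String → Option String
  | [], _ => none
  | t :: ts, acc =>
    let acc' : List String :=
      match WORD_TO_DIGIT.get? t with
      | some d => acc ++ [d]          -- token in WORD_TO_DIGIT: append its digit
      | none => []                    -- reset if we hit a non-digit token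
    if acc'.length = 3 then some (PySem.Str.join "" acc') else ftsd_loopA ts acc'

def find_three_spoken_digits (text : String) : Option String :=
  ftsd_loopA (PySem.Str.split₀ (PySem.Str.lower text)) []

-- ===== PORT B =====
-- B's loop over zip(tokens, tokens[1:], tokens[2:]): first window whose three tokens all map.
def ftsd_loopB : List (String × String × String) → Option String
  | [] => none
  | (t1, t2, t3) :: rest =>
    match WORD_TO_DIGIT.get? t1, WORD_TO_DIGIT.get? t2, WORD_TO_DIGIT.get? t3 with
    | some d1, some d2, some d3 => some (PySem.Str.join "" [d1, d2, d3])
    | _, _, _ => ftsd_loopB rest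

def find_three_spoken_digits_alt (text : String) : Option String :=
  let tokens := PySem.Str.split₀ (PySem.Str.lower text)
  ftsd_loopB (List.zip tokens (List.zip (PySem.List.slice tokens (some 1) none)
                                        (PySem.List.slice tokens (some 2) none)))

-- ===== PRECONDITION & SPEC =====
def Spec_find_three_spoken_digits (text : String) (out : Option String) : Prop := out = find_three_spoken_digits_alt text
instance (text : String) (out : Option String) : Decidable (Spec_find_three_spoken_digits text out) := by unfold Spec_find_three_spoken_digits; infer_instance

-- ===== CLAIM (what is proved, stated in full; the proofs are below) =====
def Claim_equal_find_three_spoken_digits : Prop := ∀ (text : String), Dom_find_three_spoken_digits text → Spec_find_three_spoken_digits text (find_three_spoken_digits text)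

-- ===== LEMMAS AND PROOFS =====

-- the window list B walks, as a function of the token list
def ftsd_win3 (ts : List String) : List (String × String × String) :=
  List.zip ts (List.zip ts.tail ts.tail.tail)

lemma ftsd_win3_cons3 (t1 t2 t3 : String) (ts : List String) :
    ftsd_win3 (t1 :: t2 :: t3 :: ts) = (t1, t2, t3) :: ftsd_win3 (t2 :: t3 :: ts) := by
  simp [ftsd_win3]

-- a window list whose head token does not map contributes nothing
lemma ftsd_skip1 (t : String) (ts : List String) (ht : WORD_TO_DIGIT.get? t = none) :
    ftsd_loopB (ftsd_win3 (t :: ts)) = ftsd_loopB (ftsd_win3 ts) := by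
  match ts with
  | [] => rfl
  | [x] => rfl
  | x :: y :: r =>
    rw [ftsd_win3_cons3]
    simp [ftsd_loopB, ht]

-- a window whose middle token does not map contributes nothing
lemma ftsd_skip2 (u t : String) (ts : List String) (ht : WORD_TO_DIGIT.get? t = none) :
    ftsd_loopB (ftsd_win3 (u :: t :: ts)) = ftsd_loopB (ftsd_win3 (t :: ts)) := by
  match ts with
  | [] => rfl
  | x :: r =>
    rw [ftsd_win3_cons3]
    simp [ftsd_loopB, ht]

-- a window whose third token does not map contributes nothing
lemma ftsd_skip3 (u1 u2 t : String) (ts : List String) (ht : WORD_TO_DIGIT.get? t = none) :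
    ftsd_loopB (ftsd_win3 (u1 :: u2 :: t :: ts)) = ftsd_loopB (ftsd_win3 (u2 :: t :: ts)) := by
  rw [ftsd_win3_cons3]
  simp [ftsd_loopB, ht]

-- simultaneous invariant: A's pending state of length 0, 1, 2 corresponds to B restarted
-- at the token(s) that produced those pending digits
lemma ftsd_main (ts : List String) :
    (∀ u1 u2 d1 d2, WORD_TO_DIGIT.get? u1 = some d1 → WORD_TO_DIGIT.get? u2 = some d2 →
        ftsd_loopA ts [d1, d2] = ftsd_loopB (ftsd_win3 (u1 :: u2 :: ts)))
    ∧ (∀ u d, WORD_TO_DIGIT.get? u = some d →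
        ftsd_loopA ts [d] = ftsd_loopB (ftsd_win3 (u :: ts)))
    ∧ ftsd_loopA ts [] = ftsd_loopB (ftsd_win3 ts) := by
  induction ts with
  | nil =>
    exact ⟨fun u1 u2 d1 d2 _ _ => rfl, fun u d _ => rfl, rfl⟩
  | cons t ts ih =>
    obtain ⟨ihP, ihQ, ihR⟩ := ih
    refine ⟨?_, ?_, ?_⟩
    · intro u1 u2 d1 d2 h1 h2
      cases ht : WORD_TO_DIGIT.get? t with
      | some d3 =>
        rw [ftsd_win3_cons3]
        simp [ftsd_loopA, ftsd_loopB, ht, h1, h2]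
      | none =>
        rw [ftsd_skip3 u1 u2 t ts ht, ftsd_skip2 u2 t ts ht, ftsd_skip1 t ts ht]
        simpa [ftsd_loopA, ht] using ihR
    · intro u d h
      cases ht : WORD_TO_DIGIT.get? t with
      | some d2 =>
        have := ihP u t d d2 h ht
        simpa [ftsd_loopA, ht] using this
      | none =>
        rw [ftsd_skip2 u t ts ht, ftsd_skip1 t ts ht]
        simpa [ftsd_loopA, ht] using ihR
    · cases ht : WORD_TO_DIGIT.get? t with
      | some d =>
        have := ihQ t d ht
        simpa [ftsd_loopA, ht] using this
      | none =>
        rw [ftsd_skip1 t ts ht]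
        simpa [ftsd_loopA, ht] using ihR

-- B's zipped slices are exactly the window list of the token list
lemma ftsd_alt_eq (text : String) :
    find_three_spoken_digits_alt text =
      ftsd_loopB (ftsd_win3 (PySem.Str.split₀ (PySem.Str.lower text))) := by
  simp [find_three_spoken_digits_alt, ftsd_win3, PySem.List.slice_from_one, pysem,
    ← List.drop_one, List.drop_drop]

-- ===== VERDICT (by name: the statement is the Claim_ definition above) =====
theorem find_three_spoken_digits_spec : Claim_equal_find_three_spoken_digits := by
  intro text _
  unfold Spec_find_three_spoken_digits
  rw [ftsd_alt_eq]
  exact (ftsd_main (PySem.Str.split₀ (PySem.Str.lower text))).2.2
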